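-- pv_equiv track=rewrite | github.com/magnushedin/AOC | 2019/dec_04/p1.py | haveSameNeighbour
-- ===== SOURCE A (Python) =====
-- def haveSameNeighbour(number):
--     strNumber = str(number)
--
--     strLast = strNumber[0]
--
--     for char in strNumber[1:]:
--         if char == strLast:
--             return True
--         strLast = char
--
--     return False
-- ===== SOURCE B (Python) =====
-- def haveSameNeighbour(number):
--     # run-length encode the decimal string, then ask for any run of length >= 2
--     runs = []
--     prev = None
--     n = 0
--     for ch in str(number):
--         if ch == prev:
--             n += 1
--         else:
--             if n:
--                 runs.append(n)
--             prev, n = ch, 1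
--     if n:
--         runs.append(n)
--     return any(r >= 2 for r in runs)
-- ===== Notes on version B (the rewrite author's own statement) =====
-- stated objective: alternative
-- what changed: B run-length-encodes the decimal string into maximal runs and returns whether any run has length >= 2, instead of A's previous-character adjacency scan with early return.
import Mathlib
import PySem

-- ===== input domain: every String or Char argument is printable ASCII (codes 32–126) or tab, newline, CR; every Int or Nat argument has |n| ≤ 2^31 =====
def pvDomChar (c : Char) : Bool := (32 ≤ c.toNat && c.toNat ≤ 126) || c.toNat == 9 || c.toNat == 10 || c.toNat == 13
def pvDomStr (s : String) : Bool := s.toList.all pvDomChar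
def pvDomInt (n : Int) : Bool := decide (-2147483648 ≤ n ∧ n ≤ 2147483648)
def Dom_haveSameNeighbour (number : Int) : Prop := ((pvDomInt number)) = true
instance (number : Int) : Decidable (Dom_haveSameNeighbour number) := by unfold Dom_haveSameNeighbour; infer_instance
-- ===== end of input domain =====

-- B replaces A's previous-character adjacency scan with a run-length encoding of the
-- decimal string, returning whether any maximal run has length >= 2 (objective: alternative).


-- ===== PORT A =====
-- the for-loop of A: walks the tail chars carrying strLast, early-returns True on a match
def pvALoop : List Char → Char → Bool
  | [], _ => false
  | c :: rest, strLast => if c = strLast then true else pvALoop rest c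

-- str(number) is never empty, so strNumber[0] never raises; the [] branch is unreachable
def haveSameNeighbour (number : Int) : Bool :=
  match (PySem.Int.toStr number).toList with
  | [] => false
  | strLast :: rest => pvALoop rest strLast

-- ===== PORT B =====
-- Source B's loop: carries the current run's char and its count, emitting the count of each
-- finished run; here the accumulated run lengths are produced directly.
def pvRuns : List Char → Char → Nat → List Nat
  | [], _, n => [n]
  | ch :: rest, prev, n =>
      if ch = prev then pvRuns rest prev (n + 1)
      else n :: pvRuns rest ch 1

def haveSameNeighbour_alt (number : Int) : Bool :=
  match (PySem.Int.toStr number).toList with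
  | [] => false
  | ch :: rest => (pvRuns rest ch 1).any (fun r => decide (2 ≤ r))

-- ===== PRECONDITION & SPEC =====
def Spec_haveSameNeighbour (number : Int) (out : Bool) : Prop := out = haveSameNeighbour_alt number
instance (number : Int) (out : Bool) : Decidable (Spec_haveSameNeighbour number out) := by unfold Spec_haveSameNeighbour; infer_instance

-- ===== CLAIM (what is proved, stated in full; the proofs are below) =====
def Claim_equal_haveSameNeighbour : Prop := ∀ (number : Int), Dom_haveSameNeighbour number → Spec_haveSameNeighbour number (haveSameNeighbour number)

-- ===== LEMMAS AND PROOFS =====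
theorem pvRuns_any_eq (l : List Char) (c : Char) (n : Nat) (hn : 1 ≤ n) :
    (pvRuns l c n).any (fun r => decide (2 ≤ r)) = (decide (2 ≤ n) || pvALoop l c) := by
  induction l generalizing c n with
  | nil => simp [pvRuns, pvALoop]
  | cons d rest ih =>
    by_cases h : d = c
    · subst h
      rw [show pvRuns (d :: rest) d n = pvRuns rest d (n + 1) from by simp [pvRuns],
        ih d (n + 1) (by omega)]
      have h2 : 2 ≤ n + 1 := by omega
      simp [pvALoop, h2]
    · simp [pvRuns, pvALoop, h, ih _ _ (le_refl 1)]

-- ===== VERDICT (by name: the statement is the Claim_ definition above) =====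
theorem haveSameNeighbour_spec : Claim_equal_haveSameNeighbour := by
  intro number _
  unfold Spec_haveSameNeighbour haveSameNeighbour haveSameNeighbour_alt
  cases h : (PySem.Int.toStr number).toList with
  | nil => rfl
  | cons c rest => simp only []; rw [pvRuns_any_eq rest c 1 (le_refl 1)]; simp
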